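-- pv_equiv track=rewrite | github.com/SimaArasteh/binhuntertool | binhunter_graph/graphs/pdg.py | find_target_memory_offsets
-- ===== SOURCE A (Python) =====
-- def find_target_memory_offsets(pcode_address, memory_targets):
--     new_targets = []
--     pcode_address.sort()
--     for addr in memory_targets:
--         if addr in pcode_address:
--             new_targets.append(addr)
--         else:
--             for idx in range(len(pcode_address)):
--                 if idx+1 < len(pcode_address):
--                     if addr > pcode_address[idx] and addr < pcode_address[idx+1]:
--                         new_targets.append(pcode_address[idx])
--
--
--     return new_targets
-- ===== SOURCE B (Python) =====
-- def find_target_memory_offsets(pcode_address, memory_targets):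
--     # Same in-place sort of pcode_address as the original; return value is the point.
--     pcode_address.sort()
--     n = len(pcode_address)
--     new_targets = []
--     for addr in memory_targets:
--         # hand-written bisect_left (no imports): first index with pcode_address[lo] >= addr
--         lo, hi = 0, n
--         while lo < hi:
--             mid = (lo + hi) // 2
--             if pcode_address[mid] < addr:
--                 lo = mid + 1
--             else:
--                 hi = mid
--         if lo < n and pcode_address[lo] == addr:
--             new_targets.append(addr)
--         elif 0 < lo and lo < n:
--             new_targets.append(pcode_address[lo - 1])
--     return new_targets
-- ===== Notes on version B (the rewrite author's own statement) =====
-- stated objective: faster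
-- what changed: Replaces the O(n) membership test plus full inner scan over all index pairs per target with a single hand-written binary search (bisect_left) on the sorted list, which answers both the membership and the containing-interval question.
import Mathlib
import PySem

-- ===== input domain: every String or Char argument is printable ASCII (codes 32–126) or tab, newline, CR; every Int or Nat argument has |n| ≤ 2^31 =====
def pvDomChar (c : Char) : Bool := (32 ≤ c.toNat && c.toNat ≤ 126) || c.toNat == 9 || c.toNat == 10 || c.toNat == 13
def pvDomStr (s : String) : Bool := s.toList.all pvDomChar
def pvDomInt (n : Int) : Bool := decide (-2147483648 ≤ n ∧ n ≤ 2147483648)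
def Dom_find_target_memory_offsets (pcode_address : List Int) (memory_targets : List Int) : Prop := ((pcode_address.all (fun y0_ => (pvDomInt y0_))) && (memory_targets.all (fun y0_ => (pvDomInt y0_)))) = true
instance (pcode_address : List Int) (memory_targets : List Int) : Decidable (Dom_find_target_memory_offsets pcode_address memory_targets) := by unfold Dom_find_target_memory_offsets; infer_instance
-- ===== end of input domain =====

-- ===== PORT A =====
-- B changes the per-target lookup to a binary search on the sorted list; A's in-place sort of
-- pcode_address is reproduced by B in Python, and the equivalence proved is about the return value.
def find_target_memory_offsets (pcode_address : List Int) (memory_targets : List Int) : List Int :=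
  let sp := PySem.List.sorted pcode_address (fun x => x) false
  memory_targets.foldl (fun new_targets addr =>
    if addr ∈ sp then
      new_targets ++ [addr]
    else
      (PySem.List.pyRange 0 (sp.length : Int) 1).foldl (fun nt idx =>
        if idx + 1 < (sp.length : Int) then
          if addr > PySem.List.pyGetD sp idx 0 ∧ addr < PySem.List.pyGetD sp (idx + 1) 0 then
            nt ++ [PySem.List.pyGetD sp idx 0]
          else nt
        else nt) new_targets) []

-- ===== PORT B =====
-- hand-written bisect_left loop from Source B (while lo < hi: mid = (lo+hi)//2 ...);
-- the while loop runs at most (hi-lo) times, so it is transcribed with that iteration count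
-- as a structural parameter (kernel-reducible; proved sufficient in pyBisectGo_spec below)
def pyBisectGo (sp : List Int) (addr : Int) : Nat → Int → Int → Int
  | 0, lo, _ => lo
  | fuel + 1, lo, hi =>
    if lo < hi then
      let mid := PySem.Int.floordiv (lo + hi) 2
      if PySem.List.pyGetD sp mid 0 < addr then pyBisectGo sp addr fuel (mid + 1) hi
      else pyBisectGo sp addr fuel lo mid
    else lo

def pyBisectLoop (sp : List Int) (addr lo hi : Int) : Int :=
  pyBisectGo sp addr (hi - lo).toNat lo hi

def find_target_memory_offsets_alt (pcode_address : List Int) (memory_targets : List Int) : List Int :=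
  let sp := PySem.List.sorted pcode_address (fun x => x) false
  let n : Int := sp.length
  memory_targets.foldl (fun new_targets addr =>
    let lo := pyBisectLoop sp addr 0 n
    if lo < n ∧ PySem.List.pyGetD sp lo 0 = addr then
      new_targets ++ [addr]
    else if 0 < lo ∧ lo < n then
      new_targets ++ [PySem.List.pyGetD sp (lo - 1) 0]
    else new_targets) []

-- ===== PRECONDITION & SPEC =====
def Spec_find_target_memory_offsets (pcode_address : List Int) (memory_targets : List Int) (out : List Int) : Prop := out = find_target_memory_offsets_alt pcode_address memory_targets
instance (pcode_address : List Int) (memory_targets : List Int) (out : List Int) : Decidable (Spec_find_target_memory_offsets pcode_address memory_targets out) := by unfold Spec_find_target_memory_offsets; infer_instance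

-- ===== CLAIM (what is proved, stated in full; the proofs are below) =====
def Claim_equal_find_target_memory_offsets : Prop := ∀ (pcode_address : List Int) (memory_targets : List Int), Dom_find_target_memory_offsets pcode_address memory_targets → Spec_find_target_memory_offsets pcode_address memory_targets (find_target_memory_offsets pcode_address memory_targets)

-- ===== LEMMAS AND PROOFS =====

-- helper: monotonicity of a (≤)-pairwise list at indices
lemma sp_mono {sp : List Int} (hs : sp.Pairwise (· ≤ ·)) {p q : Nat}
    (hpq : p ≤ q) (hq : q < sp.length) : sp[p]'(by omega) ≤ sp[q] := by
  rcases Nat.lt_or_ge p q with h | h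
  · exact List.pairwise_iff_getElem.mp hs p q (by omega) hq h
  · have : p = q := by omega
    subst this; exact le_refl _

-- binary-search characterisation: pyBisectLoop returns the first index with addr ≤ sp[j]
lemma pyBisectGo_spec (sp : List Int) (hs : sp.Pairwise (· ≤ ·)) (addr : Int) :
    ∀ (fuel : Nat) (lo hi : Int), (hi - lo).toNat ≤ fuel → 0 ≤ lo → lo ≤ hi → hi ≤ (sp.length : Int) →
    (∀ j : Nat, j < lo.toNat → ∀ hj : j < sp.length, sp[j] < addr) →
    (∀ j : Nat, hi.toNat ≤ j → ∀ hj : j < sp.length, addr ≤ sp[j]) →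
    0 ≤ pyBisectGo sp addr fuel lo hi ∧ pyBisectGo sp addr fuel lo hi ≤ (sp.length : Int) ∧
    (∀ j : Nat, j < (pyBisectGo sp addr fuel lo hi).toNat → ∀ hj : j < sp.length, sp[j] < addr) ∧
    (∀ j : Nat, (pyBisectGo sp addr fuel lo hi).toNat ≤ j → ∀ hj : j < sp.length, addr ≤ sp[j]) := by
  intro fuel
  induction fuel with
  | zero =>
    intro lo hi hf h0 hlh hhn hlo hhi
    have heq : lo = hi := by omega
    refine ⟨h0, by simpa [pyBisectGo] using by omega, ?_, ?_⟩
    · simpa [pyBisectGo] using hlo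
    · intro j hj hjl
      exact hhi j (by simp [pyBisectGo] at hj; omega) hjl
  | succ fuel ih =>
    intro lo hi hf h0 hlh hhn hlo hhi
    by_cases h : lo < hi
    · have hmb := PySem.Int.floordiv_two_mid_bounds (le_of_lt h)
      have hmlt : PySem.Int.floordiv (lo + hi) 2 < hi :=
        (PySem.Int.floordiv_lt_iff_lt_mul (by omega)).mpr (by omega)
      set mid := PySem.Int.floordiv (lo + hi) 2 with hmid
      have hmlen : mid.toNat < sp.length := by omega
      have hmget : PySem.List.pyGetD sp mid 0 = sp[mid.toNat] :=
        PySem.List.pyGetD_eq_getElem sp 0 (by omega) (by omega)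
      by_cases hm : PySem.List.pyGetD sp mid 0 < addr
      · have hrw : pyBisectGo sp addr (fuel + 1) lo hi = pyBisectGo sp addr fuel (mid + 1) hi := by
          simp only [pyBisectGo, if_pos h, ← hmid, if_pos hm]
        rw [hrw]
        refine ih (mid + 1) hi (by omega) (by omega) (by omega) hhn ?_ hhi
        intro j hj hjl
        have : sp[j] ≤ sp[mid.toNat] := sp_mono hs (by omega) hmlen
        omega
      · have hrw : pyBisectGo sp addr (fuel + 1) lo hi = pyBisectGo sp addr fuel lo mid := by
          simp only [pyBisectGo, if_pos h, ← hmid, if_neg hm]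
        rw [hrw]
        refine ih lo mid (by omega) (by omega) (by omega) (by omega) hlo ?_
        intro j hj hjl
        have : sp[mid.toNat] ≤ sp[j] := sp_mono hs (by omega) hjl
        omega
    · have hrw : pyBisectGo sp addr (fuel + 1) lo hi = lo := by
        simp only [pyBisectGo, if_neg h]
      rw [hrw]
      have heq : lo = hi := by omega
      refine ⟨h0, by omega, hlo, ?_⟩
      intro j hj hjl
      exact hhi j (by omega) hjl

lemma pyBisectLoop_spec (sp : List Int) (hs : sp.Pairwise (· ≤ ·)) (addr : Int)
    (lo hi : Int) (h0 : 0 ≤ lo) (hlh : lo ≤ hi) (hhn : hi ≤ (sp.length : Int))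
    (hlo : ∀ j : Nat, j < lo.toNat → ∀ hj : j < sp.length, sp[j] < addr)
    (hhi : ∀ j : Nat, hi.toNat ≤ j → ∀ hj : j < sp.length, addr ≤ sp[j]) :
    0 ≤ pyBisectLoop sp addr lo hi ∧ pyBisectLoop sp addr lo hi ≤ (sp.length : Int) ∧
    (∀ j : Nat, j < (pyBisectLoop sp addr lo hi).toNat → ∀ hj : j < sp.length, sp[j] < addr) ∧
    (∀ j : Nat, (pyBisectLoop sp addr lo hi).toNat ≤ j → ∀ hj : j < sp.length, addr ≤ sp[j]) :=
  pyBisectGo_spec sp hs addr (hi - lo).toNat lo hi le_rfl h0 hlh hhn hlo hhi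

-- the per-target step of A equals the per-target step of B, on the sorted list
lemma step_eq (sp : List Int) (hs : sp.Pairwise (· ≤ ·)) (addr : Int) (acc : List Int) :
    (if addr ∈ sp then
      acc ++ [addr]
    else
      (PySem.List.pyRange 0 (sp.length : Int) 1).foldl (fun nt idx =>
        if idx + 1 < (sp.length : Int) then
          if addr > PySem.List.pyGetD sp idx 0 ∧ addr < PySem.List.pyGetD sp (idx + 1) 0 then
            nt ++ [PySem.List.pyGetD sp idx 0]
          else nt
        else nt) acc) =
    (if pyBisectLoop sp addr 0 (sp.length : Int) < (sp.length : Int) ∧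
        PySem.List.pyGetD sp (pyBisectLoop sp addr 0 (sp.length : Int)) 0 = addr then
       acc ++ [addr]
     else if 0 < pyBisectLoop sp addr 0 (sp.length : Int) ∧
        pyBisectLoop sp addr 0 (sp.length : Int) < (sp.length : Int) then
       acc ++ [PySem.List.pyGetD sp (pyBisectLoop sp addr 0 (sp.length : Int) - 1) 0]
     else acc) := by
  obtain ⟨hr0, hrn, hlt, hge⟩ := pyBisectLoop_spec sp hs addr 0 (sp.length : Int)
    le_rfl (Int.natCast_nonneg _) le_rfl (fun j hj hjl => by omega) (fun j hj hjl => by omega)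
  set r := pyBisectLoop sp addr 0 (sp.length : Int) with hr
  by_cases hmem : addr ∈ sp
  · -- addr is in the list: both sides append addr
    obtain ⟨k, hk, hke⟩ := List.mem_iff_getElem.mp hmem
    have hkr : ¬ k < r.toNat := fun hh => by have := hlt k hh hk; omega
    have hrlen : r.toNat < sp.length := by omega
    have hspr : sp[r.toNat] = addr := by
      have h1 := hge r.toNat le_rfl hrlen
      have h2 : sp[r.toNat] ≤ sp[k] := sp_mono hs (by omega) hk
      omega
    have hB : r < (sp.length : Int) ∧ PySem.List.pyGetD sp r 0 = addr := by
      refine ⟨by omega, ?_⟩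
      rw [PySem.List.pyGetD_eq_getElem sp 0 hr0 (by omega)]; exact hspr
    rw [if_pos hmem, if_pos hB]
  · -- addr not in the list: A's inner scan finds exactly the interval B's bisection finds
    have hne : ∀ j : Nat, (hj : j < sp.length) → sp[j] ≠ addr :=
      fun j hj h => hmem (h ▸ List.getElem_mem hj)
    have hgt : ∀ j : Nat, r.toNat ≤ j → (hj : j < sp.length) → addr < sp[j] := by
      intro j h1 hj
      have := hge j h1 hj
      have := hne j hj
      omega
    rw [if_neg hmem]
    rw [List.foldl_ext _ (fun nt idx =>
        if (decide (idx + 1 < (sp.length : Int)) &&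
            (decide (addr > PySem.List.pyGetD sp idx 0) &&
             decide (addr < PySem.List.pyGetD sp (idx + 1) 0))) = true then
          nt ++ [PySem.List.pyGetD sp idx 0]
        else nt) acc
      (by
        intro a b _
        by_cases h1 : b + 1 < (sp.length : Int) <;>
          by_cases h2 : addr > PySem.List.pyGetD sp b 0 ∧ addr < PySem.List.pyGetD sp (b + 1) 0 <;>
          simp [h1, h2])]
    rw [PySem.List.foldl_append_if]
    by_cases hmid : 0 < r ∧ r < (sp.length : Int)
    · -- the bisection index is interior: the scan appends exactly sp[r-1]
      have hB1 : ¬ (r < (sp.length : Int) ∧ PySem.List.pyGetD sp r 0 = addr) := by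
        rintro ⟨h1, h2⟩
        rw [PySem.List.pyGetD_eq_getElem sp 0 hr0 (by omega)] at h2
        exact hne r.toNat (by omega) h2
      rw [if_neg hB1, if_pos hmid]
      have hsplit : PySem.List.pyRange 0 (sp.length : Int) 1 =
          PySem.List.pyRange 0 (r - 1) 1 ++ (PySem.List.pyRange (r - 1) r 1 ++
            PySem.List.pyRange r (sp.length : Int) 1) := by
        rw [← PySem.List.pyRange_one_append (r - 1) r (sp.length : Int) (by omega) (by omega),
            ← PySem.List.pyRange_one_append 0 (r - 1) (sp.length : Int) (by omega) (by omega)]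
      have hsing : PySem.List.pyRange (r - 1) r 1 = [r - 1] := by
        have := PySem.List.pyRange_one_singleton (r - 1)
        rwa [show r - 1 + 1 = r by omega] at this
      rw [hsplit, hsing, List.filter_append, List.filter_append]
      have hfl : (PySem.List.pyRange 0 (r - 1) 1).filter (fun idx =>
          decide (idx + 1 < (sp.length : Int)) &&
            (decide (addr > PySem.List.pyGetD sp idx 0) &&
             decide (addr < PySem.List.pyGetD sp (idx + 1) 0))) = [] := by
        rw [List.filter_eq_nil_iff]
        intro x hx
        have hxb := PySem.List.mem_pyRange_one.mp hx
        simp only [Bool.and_eq_true, decide_eq_true_eq, not_and]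
        intro h1 _
        rw [PySem.List.pyGetD_eq_getElem sp 0 (by omega) (by omega)]
        have := hlt (x + 1).toNat (by omega) (by omega)
        omega
      have hfr : (PySem.List.pyRange r (sp.length : Int) 1).filter (fun idx =>
          decide (idx + 1 < (sp.length : Int)) &&
            (decide (addr > PySem.List.pyGetD sp idx 0) &&
             decide (addr < PySem.List.pyGetD sp (idx + 1) 0))) = [] := by
        rw [List.filter_eq_nil_iff]
        intro x hx
        have hxb := PySem.List.mem_pyRange_one.mp hx
        simp only [Bool.and_eq_true, decide_eq_true_eq, not_and]
        intro _ h2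
        rw [PySem.List.pyGetD_eq_getElem sp 0 (by omega) (by omega)] at h2
        have := hge x.toNat (by omega) (by omega)
        omega
      have hfm : [r - 1].filter (fun idx =>
          decide (idx + 1 < (sp.length : Int)) &&
            (decide (addr > PySem.List.pyGetD sp idx 0) &&
             decide (addr < PySem.List.pyGetD sp (idx + 1) 0))) = [r - 1] := by
        have c2 : addr > PySem.List.pyGetD sp (r - 1) 0 := by
          rw [PySem.List.pyGetD_eq_getElem sp 0 (by omega) (by omega)]
          exact hlt (r - 1).toNat (by omega) (by omega)
        have c3 : addr < PySem.List.pyGetD sp (r - 1 + 1) 0 := by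
          rw [show r - 1 + 1 = r by omega,
              PySem.List.pyGetD_eq_getElem sp 0 hr0 (by omega)]
          exact hgt r.toNat le_rfl (by omega)
        simp only [List.filter_cons, List.filter_nil]
        rw [if_pos (by simp only [Bool.and_eq_true, decide_eq_true_eq]; exact ⟨by omega, c2, c3⟩)]
      rw [hfl, hfr, hfm]
      simp
    · -- the bisection index is at a boundary: the scan appends nothing
      have hB1 : ¬ (r < (sp.length : Int) ∧ PySem.List.pyGetD sp r 0 = addr) := by
        rintro ⟨h1, h2⟩
        rw [PySem.List.pyGetD_eq_getElem sp 0 hr0 (by omega)] at h2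
        exact hne r.toNat (by omega) h2
      rw [if_neg hB1, if_neg hmid]
      have hf : (PySem.List.pyRange 0 (sp.length : Int) 1).filter (fun idx =>
          decide (idx + 1 < (sp.length : Int)) &&
            (decide (addr > PySem.List.pyGetD sp idx 0) &&
             decide (addr < PySem.List.pyGetD sp (idx + 1) 0))) = [] := by
        rw [List.filter_eq_nil_iff]
        intro x hx
        have hxb := PySem.List.mem_pyRange_one.mp hx
        simp only [Bool.and_eq_true, decide_eq_true_eq, not_and]
        intro h1 h2
        rw [PySem.List.pyGetD_eq_getElem sp 0 (by omega) (by omega)] at h2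
        rcases (by omega : r = 0 ∨ r = (sp.length : Int)) with h | h
        · have := hge x.toNat (by omega) (by omega)
          omega
        · intro h3
          rw [PySem.List.pyGetD_eq_getElem sp 0 (by omega) (by omega)] at h3
          have := hlt (x + 1).toNat (by omega) (by omega)
          omega
      rw [hf]
      simp

-- ===== VERDICT (by name: the statement is the Claim_ definition above) =====
theorem find_target_memory_offsets_spec : Claim_equal_find_target_memory_offsets := by
  intro pcode_address memory_targets _
  unfold Spec_find_target_memory_offsets find_target_memory_offsets find_target_memory_offsets_alt
  have hs := PySem.List.sorted_pairwise pcode_address (fun x => x)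
  simp only []
  exact List.foldl_ext _ _ [] (fun acc addr _ => step_eq _ hs addr acc)
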